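-- pv_equiv track=rewrite | github.com/MrBrantCode/unitest_baseline | mut_generate/mist_train_taco/taco_17474/solution.py | longest_null
-- ===== SOURCE A (Python) =====
-- def longest_null(S: str) -> int:
--     arr = []
--     arr.append(['@', -1])
--     maxlen = 0
--
--     for i in range(len(S)):
--         arr.append([S[i], i])
--
--         while len(arr) >= 3 and arr[-3][0] == '1' and arr[-2][0] == '0' and arr[-1][0] == '0':
--             arr.pop()
--             arr.pop()
--             arr.pop()
--
--         temp = arr[-1]
--         maxlen = max(maxlen, i - temp[1])
--
--     return maxlen
-- ===== SOURCE B (Python) =====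
-- def longest_null(S: str) -> int:
--     # Prefix-balance method: weight '1'=+2, '0'=-1; a substring reduces to null
--     # iff its weighted sum is 0 and no internal prefix dips below 0. Keep, for each
--     # balance value, the earliest index still valid (no later dip below it), found
--     # in O(1) via a dict; any other character resets the scan baseline.
--     first = {0: -1}
--     bal = 0
--     maxlen = 0
--     for i, c in enumerate(S):
--         if c == '1':
--             bal += 2
--         elif c == '0':
--             first.pop(bal, None)
--             bal -= 1
--         else:
--             first = {}
--             bal = 0
--         j = first.setdefault(bal, i)
--         if i - j > maxlen:
--             maxlen = i - j
--     return maxlen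
-- ===== Notes on version B (the rewrite author's own statement) =====
-- stated objective: faster
-- what changed: B drops A's character stack with its inner while-loop popping '100' triples and instead does a prefix-balance scan ('1'=+2, '0'=-1) with a dict mapping each balance value to its earliest still-valid index (seeded {0:-1}, reset on any other character), reading the longest removable substring ending at i as i minus the stored index of the current balance.
import Mathlib
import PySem

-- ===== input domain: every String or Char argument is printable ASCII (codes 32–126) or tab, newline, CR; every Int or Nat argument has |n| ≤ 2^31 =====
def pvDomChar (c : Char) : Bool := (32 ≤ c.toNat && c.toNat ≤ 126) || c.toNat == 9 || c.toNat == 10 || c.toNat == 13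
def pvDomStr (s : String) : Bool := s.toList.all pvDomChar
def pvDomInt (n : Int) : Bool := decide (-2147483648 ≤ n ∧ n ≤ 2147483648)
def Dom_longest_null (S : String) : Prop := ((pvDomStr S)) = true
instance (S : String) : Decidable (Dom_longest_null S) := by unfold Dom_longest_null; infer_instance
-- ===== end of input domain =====

-- B replaces A's explicit stack reduction (push every char, while-loop popping '1','0','0'
-- triples) by a prefix-balance scan ('1' = +2, '0' = -1) with a dict of earliest valid
-- indices per balance value; objective: faster (constant factor, measured).

-- ===== PORT A =====
-- A's Python list `arr` is a stack (append/pop at the end); it is represented here with the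
-- TOP AT THE HEAD of a Lean list, so `arr.append(x)` is cons, `arr[-1]` is head, `arr[-3]` is
-- the third element, and the three `arr.pop()` drop the first three elements.
def pvAWhile : List (Char × Int) → List (Char × Int)
  | (c1, i1) :: (c2, i2) :: (c3, i3) :: rest =>
      -- Python: while len(arr) >= 3 and arr[-3][0]=='1' and arr[-2][0]=='0' and arr[-1][0]=='0'
      if c3 = '1' ∧ c2 = '0' ∧ c1 = '0' then pvAWhile rest
      else (c1, i1) :: (c2, i2) :: (c3, i3) :: rest
  | arr => arr

def pvAStep (st : List (Char × Int) × Int) (p : Int × Char) : List (Char × Int) × Int :=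
  let arr := pvAWhile ((p.2, p.1) :: st.1)          -- arr.append([S[i], i]); then the while loop
  let temp := arr.headD ('@', -1)                    -- temp = arr[-1] (arr is provably nonempty)
  (arr, max st.2 (p.1 - temp.2))                     -- maxlen = max(maxlen, i - temp[1])

def longest_null (S : String) : Int :=
  ((PySem.List.enumerate S.toList 0).foldl pvAStep ([(('@' : Char), (-1 : Int))], 0)).2

-- ===== PORT B =====
def pvBUpd (maxlen i j : Int) : Int := if i - j > maxlen then i - j else maxlen

-- state = (first, bal, maxlen); `first.pop(bal, None)` is Dict.erase, and
-- `j = first.setdefault(bal, i)` is read as j := (first.get? bal).getD i together with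
-- first := first.setdefault bal i (exactly Python's setdefault: return existing value, else insert i).
def pvBStep (st : PySem.Dict Int Int × Int × Int) (p : Int × Char) : PySem.Dict Int Int × Int × Int :=
  let i := p.1; let c := p.2
  let db : PySem.Dict Int Int × Int :=
    if c = '1' then (st.1, st.2.1 + 2)
    else if c = '0' then (st.1.erase st.2.1, st.2.1 - 1)
    else (PySem.Dict.mk [], 0)
  let j := (db.1.get? db.2).getD i
  (db.1.setdefault db.2 i, db.2, pvBUpd st.2.2 i j)

def longest_null_alt (S : String) : Int :=
  ((PySem.List.enumerate S.toList 0).foldl pvBStep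
    (PySem.Dict.mk [((0 : Int), (-1 : Int))], 0, 0)).2.2

-- ===== PRECONDITION & SPEC =====
def Spec_longest_null (S : String) (out : Int) : Prop := out = longest_null_alt S
instance (S : String) (out : Int) : Decidable (Spec_longest_null S out) := by unfold Spec_longest_null; infer_instance

-- ===== CLAIM (what is proved, stated in full; the proofs are below) =====
def Claim_equal_longest_null : Prop := ∀ (S : String), Dom_longest_null S → Spec_longest_null S (longest_null S)

-- ===== LEMMAS AND PROOFS =====

-- weight of a character in B's balance ('1' = +2, everything else that reaches it = '0' = -1)
def pvW (c : Char) : Int := if c = '1' then 2 else -1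

def pvWsum (seg : List (Char × Int)) : Int := (seg.map (fun e => pvW e.1)).sum

-- "skyline" of A's stack (top at head): pvSky l bal v = index of the topmost element of l
-- whose cumulative weight is v, provided every element above it has cumulative weight > v;
-- bal is the cumulative weight of the head element.
def pvSky : List (Char × Int) → Int → Int → Option Int
  | [], _, _ => none
  | (c, j) :: rest, bal, v =>
      if v = bal then some j
      else if v < bal then pvSky rest (bal - pvW c) v
      else none

-- the reduced ('100'-free) part of A's stack above the zeros: blocks "1" and "10" (top at head)
inductive pvToks : List (Char × Int) → Prop
  | nil : pvToks []
  | one (j : Int) {t : List (Char × Int)} : pvToks t → pvToks (('1', j) :: t)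
  | ten (i j : Int) {t : List (Char × Int)} : pvToks t → pvToks (('0', i) :: ('1', j) :: t)

-- coupling invariant: A's stack is tokens ++ zeros ++ barrier :: frozen-rest, B's bal is the
-- weight of the live segment, and B's dict is exactly the skyline of the live segment+barrier.
def pvInv (arr : List (Char × Int)) (d : PySem.Dict Int Int) (bal : Int) : Prop :=
  ∃ t z bc ib rest,
    arr = t ++ z ++ (bc, ib) :: rest ∧ pvToks t ∧ (∀ e ∈ z, e.1 = '0') ∧
    bc ≠ '0' ∧ bc ≠ '1' ∧ bal = pvWsum (t ++ z) ∧
    (∀ v, d.get? v = pvSky (t ++ z ++ [(bc, ib)]) bal v)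

theorem pvGetErase (d : PySem.Dict Int Int) (k v : Int) :
    (d.erase k).get? v = if v = k then none else d.get? v := by
  obtain ⟨items⟩ := d
  induction items with
  | nil => simp [PySem.Dict.erase, PySem.Dict.get?]
  | cons p rest ih =>
    simp only [PySem.Dict.erase, PySem.Dict.get?, List.filter_cons] at ih ⊢
    by_cases hp : p.1 = k
    · rw [show (!(p.1 == k)) = false by simp [hp]]
      simp only [Bool.false_eq_true, if_false]
      by_cases hv : v = k
      · rw [if_pos hv]; rw [if_pos hv] at ih; exact ih
      · rw [if_neg hv]; rw [if_neg hv] at ih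
        rw [List.find?_cons_of_neg (by simp; omega)]
        exact ih
    · rw [show (!(p.1 == k)) = true by simp [hp]]
      simp only [if_true]
      by_cases hv : p.1 = v
      · rw [List.find?_cons_of_pos (by simp [hv]),
          List.find?_cons_of_pos (by simp [hv]), if_neg (show ¬ v = k by omega)]
      · rw [List.find?_cons_of_neg (by simp [hv]),
          List.find?_cons_of_neg (by simp [hv])]
        exact ih

theorem pvSky_gt : ∀ (l : List (Char × Int)) (bal v : Int), bal < v → pvSky l bal v = none
  | [], _, _, _ => rfl
  | (c, j) :: rest, bal, v, h => by
      show (if v = bal then some j else if v < bal then pvSky rest (bal - pvW c) v else none) = none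
      rw [if_neg (by omega), if_neg (by omega)]

theorem pvSky_self (c : Char) (j : Int) (l : List (Char × Int)) (bal : Int) :
    pvSky ((c, j) :: l) bal bal = some j := by
  show (if bal = bal then some j else _) = some j
  rw [if_pos rfl]

theorem pvSky_lt (c : Char) (j : Int) (l : List (Char × Int)) (bal v : Int) (h : v < bal) :
    pvSky ((c, j) :: l) bal v = pvSky l (bal - pvW c) v := by
  show (if v = bal then some j else if v < bal then pvSky l (bal - pvW c) v else none) = _
  rw [if_neg (by omega), if_pos h]

-- below an all-zeros prefix every cumulative weight is above v, so nothing at v is visible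
theorem pvSky_zeros : ∀ (z : List (Char × Int)), (∀ e ∈ z, e.1 = '0') →
    ∀ (x : Char × Int) (bal v : Int), v < bal → pvSky (z ++ [x]) bal v = none
  | [], _, (cx, jx), bal, v, h => by
      show (if v = bal then some jx else if v < bal then pvSky [] (bal - pvW cx) v else none) = none
      rw [if_neg (by omega), if_pos h]; rfl
  | (c0, j0) :: z', hz, x, bal, v, h => by
      have hc0 : c0 = '0' := hz (c0, j0) (by simp)
      rw [show ((c0, j0) :: z') ++ [x] = (c0, j0) :: (z' ++ [x]) by rfl,
        pvSky_lt c0 j0 (z' ++ [x]) bal v h]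
      exact pvSky_zeros z' (fun e he => hz e (by simp [he])) x _ v
        (by simp [pvW, hc0]; omega)

theorem pvAWhile_noPopTop : ∀ (a : Char × Int) (l : List (Char × Int)), a.1 ≠ '0' →
    pvAWhile (a :: l) = a :: l
  | (c1, i1), [], _ => rfl
  | (c1, i1), [b], _ => rfl
  | (c1, i1), (c2, i2) :: (c3, i3) :: l', h => by
      simp only [pvAWhile]
      rw [if_neg]
      rintro ⟨-, -, h0⟩; exact h h0

theorem pvAWhile_noPop2 : ∀ (a b : Char × Int) (l : List (Char × Int)), b.1 ≠ '0' →
    pvAWhile (a :: b :: l) = a :: b :: l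
  | (c1, i1), (c2, i2), [], _ => rfl
  | (c1, i1), (c2, i2), (c3, i3) :: l', h => by
      simp only [pvAWhile]
      rw [if_neg]
      rintro ⟨-, h0, -⟩; exact h h0

theorem pvAWhile_noPop3 : ∀ (a b c : Char × Int) (l : List (Char × Int)), c.1 ≠ '1' →
    pvAWhile (a :: b :: c :: l) = a :: b :: c :: l
  | (c1, i1), (c2, i2), (c3, i3), l', h => by
      simp only [pvAWhile]
      rw [if_neg]
      rintro ⟨h1, -, -⟩; exact h h1

-- a stack in invariant shape is already fully reduced: the while loop does not fire on it
theorem pvAWhile_struct (t z : List (Char × Int)) (bc : Char) (ib : Int)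
    (rest : List (Char × Int)) (ht : pvToks t) (hz : ∀ e ∈ z, e.1 = '0')
    (hbc : bc ≠ '0') (hbc1 : bc ≠ '1') :
    pvAWhile (t ++ z ++ (bc, ib) :: rest) = t ++ z ++ (bc, ib) :: rest := by
  cases ht with
  | nil =>
    match z, hz with
    | [], _ => exact pvAWhile_noPopTop (bc, ib) rest hbc
    | [z1], hz => exact pvAWhile_noPop2 z1 (bc, ib) rest hbc
    | z1 :: z2 :: zs, hz =>
      match zs with
      | [] => exact pvAWhile_noPop3 z1 z2 (bc, ib) rest hbc1
      | z3 :: zs' => exact pvAWhile_noPop3 z1 z2 z3 (zs' ++ (bc, ib) :: rest) (by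
          have := hz z3 (by simp); simp [this])
  | one j ht' =>
    exact pvAWhile_noPopTop ('1', j) _ (by simp)
  | ten i j ht' =>
    exact pvAWhile_noPop2 ('0', i) ('1', j) _ (by simp)

theorem pvMaxUpd (m i t : Int) : max m (i - t) = pvBUpd m i t := by
  unfold pvBUpd; rw [max_def]; split_ifs <;> omega

-- a dict {0: j} looks up exactly like the skyline of a one-element live stack
theorem pvSingle (cB : Char) (jB v : Int) :
    (PySem.Dict.mk [((0 : Int), jB)]).get? v = pvSky [(cB, jB)] 0 v := by
  simp only [PySem.Dict.get?, List.find?]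
  by_cases h : v = 0
  · subst h; simp [pvSky]
  · rw [show ((0:Int) == v) = false from beq_eq_false_iff_ne.mpr (by omega)]
    show none = (if v = 0 then some jB else if v < 0 then pvSky [] (0 - pvW cB) v else none)
    rw [if_neg h]; split_ifs <;> rfl

-- the element exposed at balance bal is the head of the live stack
theorem pvSky_headD (l : List (Char × Int)) (x : Char × Int) (bal : Int) :
    pvSky (l ++ [x]) bal bal = some (((l ++ [x]).headD x).2) := by
  cases l with
  | nil => obtain ⟨cx, jx⟩ := x; simpa using pvSky_self cx jx [] bal
  | cons e l' => obtain ⟨ce, je⟩ := e; simpa using pvSky_self ce je (l' ++ [x]) bal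

theorem pvHeadD_eq (t z rest : List (Char × Int)) (x dflt : Char × Int) :
    (t ++ z ++ x :: rest).headD dflt = (t ++ z ++ [x]).headD x := by
  cases t <;> cases z <;> simp

theorem pvW_one : pvW '1' = 2 := rfl
theorem pvW_zero : pvW '0' = -1 := rfl

-- one synchronized step: same maxlen update, invariant preserved
theorem pvStep (arr : List (Char × Int)) (d : PySem.Dict Int Int) (bal m : Int)
    (hinv : pvInv arr d bal) (i : Int) (c : Char) :
    (pvAStep (arr, m) (i, c)).2 = (pvBStep (d, bal, m) (i, c)).2.2 ∧
    pvInv (pvAStep (arr, m) (i, c)).1 (pvBStep (d, bal, m) (i, c)).1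
      (pvBStep (d, bal, m) (i, c)).2.1 := by
  obtain ⟨t, z, bc, ib, rest, rfl, ht, hz, hbc0, hbc1, hbal, hsky⟩ := hinv
  have hAdef : ∀ (arr0 : List (Char × Int)), pvAStep (arr0, m) (i, c) =
      (pvAWhile ((c, i) :: arr0), max m (i - ((pvAWhile ((c, i) :: arr0)).headD ('@', -1)).2)) :=
    fun _ => rfl
  by_cases hc1 : c = '1'
  · -- push a '1': weight +2, the new balance is fresh in the dict
    subst hc1
    have hB : pvBStep (d, bal, m) (i, '1') =
        (d.setdefault (bal + 2) i, bal + 2, pvBUpd m i ((d.get? (bal + 2)).getD i)) := by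
      simp [pvBStep]
    have hget : d.get? (bal + 2) = none := by
      rw [hsky]; exact pvSky_gt _ bal (bal + 2) (by omega)
    have hAw : pvAWhile (('1', i) :: (t ++ z ++ (bc, ib) :: rest)) =
        ('1', i) :: (t ++ z ++ (bc, ib) :: rest) :=
      pvAWhile_noPopTop _ _ (by simp)
    have hsd : d.setdefault (bal + 2) i = d.insert (bal + 2) i :=
      PySem.Dict.setdefault_of_not_contains _ i (by
        rw [PySem.Dict.contains_eq_isSome_get?, hget]; rfl)
    constructor
    · rw [hAdef, hB, hAw]
      simp only [List.headD_cons, hget, Option.getD_none]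
      exact pvMaxUpd m i i
    · rw [hAdef, hB, hAw]
      refine ⟨('1', i) :: t, z, bc, ib, rest, by simp, pvToks.one i ht, hz,
        hbc0, hbc1, by simp [pvWsum, pvW] at hbal ⊢; omega, ?_⟩
      intro v
      simp only [List.cons_append]
      rw [hsd, PySem.Dict.get?_insert]
      by_cases hv : v = bal + 2
      · subst hv; rw [if_pos rfl, pvSky_self]
      · rw [if_neg hv, hsky]
        rcases lt_trichotomy v (bal + 2) with hlt | he | hgt
        · rw [pvSky_lt _ _ _ _ _ hlt, show bal + 2 - pvW '1' = bal by simp only [pvW_one]; omega]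
        · exact absurd he hv
        · rw [pvSky_gt _ bal v (by omega), pvSky_gt _ (bal + 2) v (by omega)]
  by_cases hc0 : c = '0'
  · -- push a '0': weight -1, the old balance key dies, balance bal-1 is looked up
    subst hc0
    have hB : pvBStep (d, bal, m) (i, '0') =
        ((d.erase bal).setdefault (bal - 1) i, bal - 1,
          pvBUpd m i (((d.erase bal).get? (bal - 1)).getD i)) := by
      simp [pvBStep]
    have herase : ∀ v, (d.erase bal).get? v =
        if v = bal then none else pvSky (t ++ z ++ [(bc, ib)]) bal v := by
      intro v; rw [pvGetErase, hsky]
    cases ht with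
    | nil =>
      -- the live segment is zeros over the barrier: the new '0' just joins them
      have hzz : ∀ e ∈ (('0', i) :: z), e.1 = '0' := by
        intro e he
        rcases List.mem_cons.1 he with h | h
        · rw [h]
        · exact hz e h
      have hAw : pvAWhile (('0', i) :: ([] ++ z ++ (bc, ib) :: rest)) =
          ('0', i) :: z ++ (bc, ib) :: rest := by
        simpa using pvAWhile_struct [] (('0', i) :: z) bc ib rest pvToks.nil hzz hbc0 hbc1
      have hnone : (d.erase bal).get? (bal - 1) = none := by
        rw [herase, if_neg (by omega)]
        simpa using pvSky_zeros z hz (bc, ib) bal (bal - 1) (by omega)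
      have hsd : (d.erase bal).setdefault (bal - 1) i = (d.erase bal).insert (bal - 1) i :=
        PySem.Dict.setdefault_of_not_contains _ i (by
          rw [PySem.Dict.contains_eq_isSome_get?, hnone]; rfl)
      constructor
      · rw [hAdef, hB, hAw]
        simp only [List.cons_append, List.headD_cons, hnone, Option.getD_none]
        exact pvMaxUpd m i i
      · rw [hAdef, hB, hAw]
        refine ⟨[], ('0', i) :: z, bc, ib, rest, by simp, pvToks.nil, hzz, hbc0, hbc1,
          by simp [pvWsum, pvW] at hbal ⊢; omega, ?_⟩
        intro v
        simp only [List.nil_append, List.cons_append]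
        rw [hsd, PySem.Dict.get?_insert]
        by_cases hv : v = bal - 1
        · subst hv; rw [if_pos rfl, pvSky_self]
        · rw [if_neg hv, herase]
          simp only [List.nil_append]
          by_cases hvb : v = bal
          · rw [if_pos hvb, hvb, pvSky_gt _ (bal - 1) bal (by omega)]
          · rw [if_neg hvb]
            rcases lt_trichotomy v (bal - 1) with hlt | he | hgt
            · rw [pvSky_lt _ _ _ _ _ hlt, show bal - 1 - pvW '0' = bal by simp only [pvW_zero]; omega]
            · exact absurd he hv
            · rw [pvSky_gt _ bal v (by omega), pvSky_gt _ (bal - 1) v (by omega)]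
    | one j ht' =>
      rename_i t'
      -- a lone pending '1' on top: the new '0' starts a "10" token
      have hAw : pvAWhile (('0', i) :: ((('1', j) :: t') ++ z ++ (bc, ib) :: rest)) =
          ('0', i) :: ('1', j) :: (t' ++ z ++ (bc, ib) :: rest) := by
        simpa using pvAWhile_noPop2 ('0', i) ('1', j) (t' ++ z ++ (bc, ib) :: rest) (by simp)
      have hnone : (d.erase bal).get? (bal - 1) = none := by
        rw [herase, if_neg (by omega)]
        simp only [List.cons_append]
        rw [pvSky_lt _ _ _ _ _ (by omega : bal - 1 < bal),
          pvSky_gt _ (bal - pvW '1') (bal - 1) (by simp only [pvW_one]; omega)]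
      have hsd : (d.erase bal).setdefault (bal - 1) i = (d.erase bal).insert (bal - 1) i :=
        PySem.Dict.setdefault_of_not_contains _ i (by
          rw [PySem.Dict.contains_eq_isSome_get?, hnone]; rfl)
      constructor
      · rw [hAdef, hB, hAw]
        simp only [List.headD_cons, hnone, Option.getD_none]
        exact pvMaxUpd m i i
      · rw [hAdef, hB, hAw]
        refine ⟨('0', i) :: ('1', j) :: t', z, bc, ib, rest, by simp, pvToks.ten i j ht', hz,
          hbc0, hbc1, by simp [pvWsum, pvW] at hbal ⊢; omega, ?_⟩
        intro v
        simp only [List.cons_append]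
        rw [hsd, PySem.Dict.get?_insert]
        by_cases hv : v = bal - 1
        · subst hv; rw [if_pos rfl, pvSky_self]
        · rw [if_neg hv, herase]
          simp only [List.cons_append]
          by_cases hvb : v = bal
          · rw [if_pos hvb, hvb, pvSky_gt _ (bal - 1) bal (by omega)]
          · rw [if_neg hvb]
            rcases lt_trichotomy v (bal - 1) with hlt | he | hgt
            · rw [pvSky_lt '0' i _ (bal - 1) v hlt,
                show bal - 1 - pvW '0' = bal by simp only [pvW_zero]; omega]
            · exact absurd he hv
            · rw [pvSky_gt _ bal v (by omega), pvSky_gt _ (bal - 1) v (by omega)]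
    | ten i0 j0 ht' =>
      rename_i t'
      -- a full "10" token on top: the new '0' completes "100"; A pops the triple
      have h1 : pvAWhile (('0', i) :: ((('0', i0) :: ('1', j0) :: t') ++ z ++ (bc, ib) :: rest)) =
          pvAWhile (t' ++ z ++ (bc, ib) :: rest) := by
        show (if ('1' : Char) = '1' ∧ ('0' : Char) = '0' ∧ ('0' : Char) = '0' then
            pvAWhile (t' ++ z ++ (bc, ib) :: rest)
          else _) = _
        rw [if_pos ⟨rfl, rfl, rfl⟩]
      have h2 : pvAWhile (t' ++ z ++ (bc, ib) :: rest) = t' ++ z ++ (bc, ib) :: rest :=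
        pvAWhile_struct t' z bc ib rest ht' hz hbc0 hbc1
      have hold : pvSky ((('0', i0) :: ('1', j0) :: t') ++ z ++ [(bc, ib)]) bal (bal - 1) =
          some (((t' ++ z ++ [(bc, ib)]).headD (bc, ib)).2) := by
        simp only [List.cons_append]
        rw [pvSky_lt _ _ _ _ _ (by omega : bal - 1 < bal),
          show bal - pvW '0' = bal + 1 by simp only [pvW_zero]; omega,
          pvSky_lt '1' j0 _ (bal + 1) (bal - 1) (by omega),
          show bal + 1 - pvW '1' = bal - 1 by simp only [pvW_one]; omega]
        exact pvSky_headD (t' ++ z) (bc, ib) (bal - 1)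
      have hsome : (d.erase bal).get? (bal - 1) =
          some (((t' ++ z ++ [(bc, ib)]).headD (bc, ib)).2) := by
        rw [herase, if_neg (by omega)]; exact hold
      have hsd : (d.erase bal).setdefault (bal - 1) i = d.erase bal :=
        PySem.Dict.setdefault_of_contains _ i (by
          rw [PySem.Dict.contains_eq_isSome_get?, hsome]; rfl)
      constructor
      · rw [hAdef, hB, h1, h2, hsome]
        simp only [Option.getD_some]
        rw [pvHeadD_eq t' z rest (bc, ib) ('@', -1)]
        exact pvMaxUpd m i _
      · rw [hAdef, hB, h1, h2]
        refine ⟨t', z, bc, ib, rest, rfl, ht', hz, hbc0, hbc1,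
          by simp [pvWsum, pvW] at hbal ⊢; omega, ?_⟩
        intro v
        rw [hsd, herase]
        by_cases hvb : v = bal
        · rw [if_pos hvb, hvb, pvSky_gt _ (bal - 1) bal (by omega)]
        · rw [if_neg hvb]
          rcases lt_trichotomy v (bal - 1) with hlt | he | hgt
          · simp only [List.cons_append]
            rw [pvSky_lt '0' i0 _ bal v (by omega),
              show bal - pvW '0' = bal + 1 by simp only [pvW_zero]; omega,
              pvSky_lt '1' j0 _ (bal + 1) v (by omega),
              show bal + 1 - pvW '1' = bal - 1 by simp only [pvW_one]; omega]
          · subst he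
            rw [hold]
            rw [pvSky_headD (t' ++ z) (bc, ib) (bal - 1)]
          · rw [pvSky_gt _ bal v (by omega), pvSky_gt _ (bal - 1) v (by omega)]
  · -- any other character: A buries the stack under a barrier, B resets dict and balance
    have hB : pvBStep (d, bal, m) (i, c) =
        (PySem.Dict.mk [((0 : Int), i)], 0, pvBUpd m i i) := by
      have h1 : pvBStep (d, bal, m) (i, c) =
          ((PySem.Dict.mk []).setdefault (0 : Int) i, (0 : Int),
            pvBUpd m i (((PySem.Dict.mk ([] : List (Int × Int))).get? 0).getD i)) := by
        simp [pvBStep, hc1, hc0]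
      rw [h1]
      rfl
    have hAw : pvAWhile ((c, i) :: (t ++ z ++ (bc, ib) :: rest)) =
        (c, i) :: (t ++ z ++ (bc, ib) :: rest) :=
      pvAWhile_noPopTop (c, i) _ (by simpa using hc0)
    constructor
    · rw [hAdef, hB, hAw]
      simp only [List.headD_cons]
      exact pvMaxUpd m i i
    · rw [hAdef, hB, hAw]
      exact ⟨[], [], c, i, t ++ z ++ (bc, ib) :: rest, by simp, pvToks.nil, by simp,
        hc0, hc1, by simp [pvWsum], fun v => pvSingle c i v⟩

theorem pvFold (l : List (Int × Char)) : ∀ (arr : List (Char × Int))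
    (d : PySem.Dict Int Int) (bal m : Int), pvInv arr d bal →
    (l.foldl pvAStep (arr, m)).2 = (l.foldl pvBStep (d, bal, m)).2.2 := by
  induction l with
  | nil => intro arr d bal m _; rfl
  | cons p l ih =>
    intro arr d bal m hinv
    obtain ⟨i, c⟩ := p
    obtain ⟨hm, hinv'⟩ := pvStep arr d bal m hinv i c
    simp only [List.foldl_cons]
    have hA : pvAStep (arr, m) (i, c) =
        ((pvAStep (arr, m) (i, c)).1, (pvBStep (d, bal, m) (i, c)).2.2) := by
      rw [← hm]
    rw [hA]
    have hB : pvBStep (d, bal, m) (i, c) =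
        ((pvBStep (d, bal, m) (i, c)).1, (pvBStep (d, bal, m) (i, c)).2.1,
          (pvBStep (d, bal, m) (i, c)).2.2) := rfl
    rw [hB] at hinv' ⊢
    exact ih _ _ _ _ hinv'

theorem pvInit : pvInv [(('@' : Char), (-1 : Int))]
    (PySem.Dict.mk [((0 : Int), (-1 : Int))]) 0 := by
  refine ⟨[], [], '@', -1, [], rfl, pvToks.nil, by simp, by decide, by decide, rfl, ?_⟩
  intro v
  simp only [List.nil_append, PySem.Dict.get?, List.find?, pvSky]
  by_cases h : v = 0
  · simp [h]
  · rw [if_neg h, show ((0:Int) == v) = false from beq_eq_false_iff_ne.mpr (by omega)]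
    split_ifs <;> rfl

-- ===== VERDICT (by name: the statement is the Claim_ definition above) =====
theorem longest_null_spec : Claim_equal_longest_null := by
  intro S _
  unfold Spec_longest_null longest_null longest_null_alt
  exact pvFold (PySem.List.enumerate S.toList 0) _ _ _ _ pvInit
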